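-- pv_equiv track=rewrite | github.com/shafak/yaban-mercini | src/handlers/sip_ai_endpoint.py | parse_sdp_rtp
-- ===== SOURCE A (Python) =====
-- def parse_sdp_rtp(sdp):
--     remote_ip = None
--     remote_port = None
--     for line in sdp.splitlines():
--         line = line.strip()
--         if line.startswith("c=IN IP4 "):
--             remote_ip = line.split("c=IN IP4 ")[1].strip()
--         elif line.startswith("m=audio "):
--             pts = line.split()
--             if len(pts) >= 2:
--                 try:
--                     remote_port = int(pts[1])
--                 except ValueError:
--                     pass
--     return remote_ip, remote_port
-- ===== SOURCE B (Python) =====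
-- def parse_sdp_rtp(sdp):
--     lines = [l.strip() for l in sdp.splitlines()]
--     remote_ip = None
--     for l in reversed(lines):
--         if l.startswith("c=IN IP4 "):
--             remote_ip = l.split("c=IN IP4 ")[1].strip()
--             break
--     remote_port = None
--     for l in reversed(lines):
--         if l.startswith("m=audio "):
--             p = _audio_port(l)
--             if p is not None:
--                 remote_port = p
--                 break
--     return remote_ip, remote_port
--
-- def _audio_port(line):
--     pts = line.split()
--     if len(pts) >= 2:
--         try:
--             return int(pts[1])
--         except ValueError:
--             return None
--     return None
-- ===== Notes on version B (the rewrite author's own statement) =====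
-- stated objective: idiomatic
-- what changed: A's single forward pass that keeps overwriting its (ip, port) accumulators is replaced by two independent backward first-match searches with early exit over the stripped lines (last match = first match in reverse), with the port-token parsing factored into a helper.
import Mathlib
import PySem

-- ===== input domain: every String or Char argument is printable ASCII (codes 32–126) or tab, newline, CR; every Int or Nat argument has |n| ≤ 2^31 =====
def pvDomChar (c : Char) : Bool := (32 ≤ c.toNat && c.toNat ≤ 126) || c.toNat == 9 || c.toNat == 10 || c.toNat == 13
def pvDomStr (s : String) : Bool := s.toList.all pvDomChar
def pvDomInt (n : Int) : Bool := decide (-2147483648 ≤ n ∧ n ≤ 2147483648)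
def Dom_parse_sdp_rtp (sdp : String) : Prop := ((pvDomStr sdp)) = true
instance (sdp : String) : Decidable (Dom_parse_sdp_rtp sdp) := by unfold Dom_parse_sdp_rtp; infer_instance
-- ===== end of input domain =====

-- B replaces A's forward fold that overwrites its accumulators with two backward first-match
-- searches over the stripped lines (idiomatic early-exit decomposition); same return values.

-- ===== PORT A =====
-- A's loop body: one forward step updating the (remote_ip, remote_port) state.
def pvStepA (st : Option String × Option Int) (line : String) : Option String × Option Int :=
  let line := PySem.Str.strip line
  if PySem.Str.startswith line "c=IN IP4 " then
    match PySem.Str.split? line "c=IN IP4 " with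
    | some ps =>
      match PySem.List.pyGet? ps 1 with
      | some s => (some (PySem.Str.strip s), st.2)
      | none => st        -- unreachable (the prefix guarantees a second piece)
    | none => st          -- unreachable (separator is nonempty)
  else if PySem.Str.startswith line "m=audio " then
    let pts := PySem.Str.split₀ line
    if 2 ≤ pts.length then
      match PySem.List.pyGet? pts 1 with
      | some t =>
        match PySem.Int.ofStr? t with
        | some n => (st.1, some n)
        | none => st      -- ValueError: pass
      | none => st        -- unreachable
    else st
  else st

def parse_sdp_rtp (sdp : String) : Option String × Option Int :=
  (PySem.Str.splitlines sdp).foldl pvStepA (none, none)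

-- ===== PORT B =====
-- Source B's _audio_port helper.
def pvAudioPort (line : String) : Option Int :=
  let pts := PySem.Str.split₀ line
  if 2 ≤ pts.length then
    match PySem.List.pyGet? pts 1 with
    | some t => PySem.Int.ofStr? t
    | none => none        -- unreachable
  else none

-- first (already-stripped) line starting with "c=IN IP4 ", with its payload extracted
def pvFindIp : List String → Option String
  | [] => none
  | l :: rest =>
    if PySem.Str.startswith l "c=IN IP4 " then
      match PySem.Str.split? l "c=IN IP4 " with
      | some ps =>
        match PySem.List.pyGet? ps 1 with
        | some s => some (PySem.Str.strip s)
        | none => pvFindIp rest   -- unreachable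
      | none => pvFindIp rest     -- unreachable
    else pvFindIp rest

-- first (already-stripped) "m=audio " line whose port token parses as an int
def pvFindPort : List String → Option Int
  | [] => none
  | l :: rest =>
    if PySem.Str.startswith l "m=audio " then
      match pvAudioPort l with
      | some n => some n
      | none => pvFindPort rest
    else pvFindPort rest

def parse_sdp_rtp_alt (sdp : String) : Option String × Option Int :=
  let lines := (PySem.Str.splitlines sdp).map PySem.Str.strip
  (pvFindIp lines.reverse, pvFindPort lines.reverse)

-- ===== PRECONDITION & SPEC =====
def Spec_parse_sdp_rtp (sdp : String) (out : Option String × Option Int) : Prop := out = parse_sdp_rtp_alt sdp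
instance (sdp : String) (out : Option String × Option Int) : Decidable (Spec_parse_sdp_rtp sdp out) := by unfold Spec_parse_sdp_rtp; infer_instance

-- ===== CLAIM (what is proved, stated in full; the proofs are below) =====
def Claim_equal_parse_sdp_rtp : Prop := ∀ (sdp : String), Dom_parse_sdp_rtp sdp → Spec_parse_sdp_rtp sdp (parse_sdp_rtp sdp)

-- ===== LEMMAS AND PROOFS =====

-- what one (already-stripped) line contributes to the ip, as an Option
def pvIpOne (l : String) : Option String :=
  if PySem.Str.startswith l "c=IN IP4 " then
    match PySem.Str.split? l "c=IN IP4 " with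
    | some ps =>
      match PySem.List.pyGet? ps 1 with
      | some s => some (PySem.Str.strip s)
      | none => none
    | none => none
  else none

-- what one (already-stripped) line contributes to the port, as an Option
def pvPortOne (l : String) : Option Int :=
  if PySem.Str.startswith l "m=audio " then pvAudioPort l else none

lemma pvFindIp_cons (l : String) (rest : List String) :
    pvFindIp (l :: rest) = (pvIpOne l).or (pvFindIp rest) := by
  simp only [pvFindIp]
  unfold pvIpOne
  split_ifs with h
  · rcases hs : PySem.Str.split? l "c=IN IP4 " with _ | ps
    · simp
    · rcases hg : PySem.List.pyGet? ps 1 with _ | s <;> simp [hg]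
  · simp

lemma pvFindPort_cons (l : String) (rest : List String) :
    pvFindPort (l :: rest) = (pvPortOne l).or (pvFindPort rest) := by
  simp only [pvFindPort]
  unfold pvPortOne
  split_ifs with h
  · rcases hp : pvAudioPort l with _ | n <;> simp
  · simp

lemma pvFindIp_append (xs ys : List String) :
    pvFindIp (xs ++ ys) = (pvFindIp xs).or (pvFindIp ys) := by
  induction xs with
  | nil => simp [pvFindIp]
  | cons l rest ih => simp [pvFindIp_cons, ih, Option.or_assoc]

lemma pvFindPort_append (xs ys : List String) :
    pvFindPort (xs ++ ys) = (pvFindPort xs).or (pvFindPort ys) := by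
  induction xs with
  | nil => simp [pvFindPort]
  | cons l rest ih => simp [pvFindPort_cons, ih, Option.or_assoc]

-- a line starting with "c=IN IP4 " cannot also start with "m=audio "
lemma not_m_of_c (s : String) (h : PySem.Str.startswith s "c=IN IP4 " = true) :
    PySem.Str.startswith s "m=audio " = false := by
  simp only [PySem.Str.startswith_eq] at *
  rw [PySem.Chars.startswith_iff] at h
  by_contra hm
  rw [Bool.not_eq_false, PySem.Chars.startswith_iff] at hm
  obtain ⟨t1, e1⟩ := h
  obtain ⟨t2, e2⟩ := hm
  rw [← e2] at e1
  simp at e1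

-- one forward step of A = the two per-line contributions, layered over the old state
lemma pvStepA_eq (st : Option String × Option Int) (l : String) :
    pvStepA st l =
      ((pvIpOne (PySem.Str.strip l)).or st.1, (pvPortOne (PySem.Str.strip l)).or st.2) := by
  unfold pvStepA pvIpOne pvPortOne pvAudioPort
  by_cases h1 : PySem.Str.startswith (PySem.Str.strip l) "c=IN IP4 " = true
  · have hm := not_m_of_c _ h1
    rw [if_pos h1, if_pos h1, hm]
    rcases hs : PySem.Str.split? (PySem.Str.strip l) "c=IN IP4 " with _ | ps
    · simp
    · rcases hg : PySem.List.pyGet? ps 1 with _ | s <;> simp [hg]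
  · rw [if_neg h1, if_neg h1]
    by_cases h2 : PySem.Str.startswith (PySem.Str.strip l) "m=audio " = true
    · rw [if_pos h2, if_pos h2]
      by_cases h3 : 2 ≤ (PySem.Str.split₀ (PySem.Str.strip l)).length
      · rw [if_pos h3, if_pos h3]
        rcases hg : PySem.List.pyGet? (PySem.Str.split₀ (PySem.Str.strip l)) 1 with _ | t
        · simp
        · rcases ho : PySem.Int.ofStr? t with _ | n <;> simp [ho]
      · rw [if_neg h3, if_neg h3]; simp
    · rw [if_neg h2, if_neg h2]; simp

-- A's whole fold, characterised by B's backward first-match searches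
lemma foldA_eq (ls : List String) (st : Option String × Option Int) :
    ls.foldl pvStepA st =
      ((pvFindIp ((ls.map PySem.Str.strip).reverse)).or st.1,
       (pvFindPort ((ls.map PySem.Str.strip).reverse)).or st.2) := by
  induction ls generalizing st with
  | nil => simp [pvFindIp, pvFindPort]
  | cons l rest ih =>
    simp only [List.foldl_cons, List.map_cons, List.reverse_cons,
      pvFindIp_append, pvFindPort_append, ih, pvStepA_eq,
      pvFindIp_cons, pvFindPort_cons]
    simp [pvFindIp, pvFindPort, Option.or_assoc]

-- ===== VERDICT (by name: the statement is the Claim_ definition above) =====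
theorem parse_sdp_rtp_spec : Claim_equal_parse_sdp_rtp := by
  intro sdp _
  unfold Spec_parse_sdp_rtp parse_sdp_rtp parse_sdp_rtp_alt
  rw [foldA_eq]
  simp
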